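-- pv_equiv track=rewrite | github.com/archanray/codiing_practice | findPermSubstring.py | checkDicts
-- ===== SOURCE A (Python) =====
-- def checkDicts(D1, D2):
--     for key in D2.keys():
--         if key in D1:
--             if D2[key] == D1[key]:
--                 pass
--             else:
--                 return False
--         else:
--             return False
--     return True
-- ===== SOURCE B (Python) =====
-- def checkDicts(D1, D2):
--     return {**D1, **D2} == D1
-- ===== Notes on version B (the rewrite author's own statement) =====
-- stated objective: simpler
-- what changed: B replaces A's explicit loop over D2's keys with a single dict merge and equality test: {**D1, **D2} == D1.
import Mathlib
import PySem

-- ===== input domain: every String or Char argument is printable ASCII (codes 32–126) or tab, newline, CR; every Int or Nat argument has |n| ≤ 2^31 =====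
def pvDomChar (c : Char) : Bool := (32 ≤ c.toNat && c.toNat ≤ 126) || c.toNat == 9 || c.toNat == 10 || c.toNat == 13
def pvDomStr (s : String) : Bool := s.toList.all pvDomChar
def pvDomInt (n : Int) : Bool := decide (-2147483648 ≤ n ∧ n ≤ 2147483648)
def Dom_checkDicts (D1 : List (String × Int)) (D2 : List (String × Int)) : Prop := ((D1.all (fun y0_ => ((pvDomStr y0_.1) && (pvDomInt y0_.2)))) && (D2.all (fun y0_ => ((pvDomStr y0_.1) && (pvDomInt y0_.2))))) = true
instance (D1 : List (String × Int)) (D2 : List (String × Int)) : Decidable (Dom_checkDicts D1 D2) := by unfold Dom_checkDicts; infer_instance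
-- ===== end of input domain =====

-- B replaces A's explicit loop over D2's keys with one dict merge and equality test ({**D1, **D2} == D1); same O(n) cost, no speed claim.
-- Dicts are association lists (lookup = first match); 'dget' is that shared dict-lookup primitive.

-- ===== PORT A =====
-- dict lookup d[k] / 'k in d': first matching pair
def dget (d : List (String × Int)) (k : String) : Option Int :=
  (d.find? (fun p => p.1 == k)).map (·.2)

-- the 'for key in D2.keys()' loop with its early returns
def checkDictsLoop (D1 D2 : List (String × Int)) : List String → Bool
  | [] => true
  | k :: ks =>
    match dget D1 k with          -- 'if key in D1'
    | some v1 =>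
      if dget D2 k == some v1     -- 'if D2[key] == D1[key]'
      then checkDictsLoop D1 D2 ks -- 'pass'
      else false
    | none => false

def checkDicts (D1 : List (String × Int)) (D2 : List (String × Int)) : Bool :=
  checkDictsLoop D1 D2 (D2.map Prod.fst)

-- ===== PORT B =====
-- {**D1, **D2} == D1 : the merged dict has D1's keys then D2's fresh keys, D2's value winning
-- on overlap; Python's dict == is order-insensitive: same key set and same value at each key.
def checkDicts_alt (D1 : List (String × Int)) (D2 : List (String × Int)) : Bool :=
  let keys1 := PySem.Set.ofList (D1.map Prod.fst)
  let keysM := PySem.Set.update keys1 (D2.map Prod.fst)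
  PySem.Set.equal keysM keys1 &&
    keysM.all (fun k => ((dget D2 k).orElse (fun _ => dget D1 k)) == dget D1 k)

-- ===== PRECONDITION & SPEC =====
def Spec_checkDicts (D1 : List (String × Int)) (D2 : List (String × Int)) (out : Bool) : Prop := out = checkDicts_alt D1 D2
instance (D1 : List (String × Int)) (D2 : List (String × Int)) (out : Bool) : Decidable (Spec_checkDicts D1 D2 out) := by unfold Spec_checkDicts; infer_instance

-- ===== CLAIM (what is proved, stated in full; the proofs are below) =====
def Claim_equal_checkDicts : Prop := ∀ (D1 : List (String × Int)) (D2 : List (String × Int)), Dom_checkDicts D1 D2 → Spec_checkDicts D1 D2 (checkDicts D1 D2)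

-- ===== LEMMAS AND PROOFS =====

theorem dget_isSome_iff (d : List (String × Int)) (k : String) :
    (dget d k).isSome = true ↔ k ∈ d.map Prod.fst := by
  simp [dget, List.find?_isSome, List.mem_map]

theorem checkDictsLoop_iff (D1 D2 : List (String × Int)) (ks : List String) :
    checkDictsLoop D1 D2 ks = true ↔
      ∀ k ∈ ks, ∃ v, dget D1 k = some v ∧ dget D2 k = some v := by
  induction ks with
  | nil => simp [checkDictsLoop]
  | cons k ks ih =>
    rcases h1 : dget D1 k with _ | v1
    · simp [checkDictsLoop, h1]
    · by_cases h2 : dget D2 k = some v1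
      · simp only [checkDictsLoop, h1, h2, beq_self_eq_true, if_true, ih, List.mem_cons]
        constructor
        · rintro h x (rfl | hx)
          · exact ⟨v1, h1, h2⟩
          · exact h x hx
        · intro h x hx; exact h x (Or.inr hx)
      · simp only [checkDictsLoop, h1, List.mem_cons]
        rw [if_neg (by simpa using h2)]
        constructor
        · intro hfalse; exact absurd hfalse (by decide)
        · intro h
          exfalso
          rcases h k (Or.inl rfl) with ⟨v, hv1, hv2⟩
          rw [h1] at hv1
          exact h2 (by rw [hv2, Option.some_inj.mp hv1])

theorem checkDicts_iff (D1 D2 : List (String × Int)) :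
    checkDicts D1 D2 = true ↔ ∀ k ∈ D2.map Prod.fst, dget D1 k = dget D2 k := by
  rw [checkDicts, checkDictsLoop_iff]
  constructor
  · intro h k hk
    rcases h k hk with ⟨v, hv1, hv2⟩
    rw [hv1, hv2]
  · intro h k hk
    have hs : (dget D2 k).isSome = true := (dget_isSome_iff D2 k).mpr hk
    rcases ho : dget D2 k with _ | v
    · rw [ho] at hs; exact absurd hs (by decide)
    · exact ⟨v, (h k hk).trans ho, rfl⟩

theorem mem_keysM (D1 D2 : List (String × Int)) (k : String) :
    k ∈ PySem.Set.update (PySem.Set.ofList (D1.map Prod.fst)) (D2.map Prod.fst) ↔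
      k ∈ D1.map Prod.fst ∨ k ∈ D2.map Prod.fst := by
  rw [PySem.Set.mem_update, PySem.Set.mem_ofList]

theorem checkDicts_alt_iff (D1 D2 : List (String × Int)) :
    checkDicts_alt D1 D2 = true ↔ ∀ k ∈ D2.map Prod.fst, dget D1 k = dget D2 k := by
  unfold checkDicts_alt
  rw [Bool.and_eq_true, PySem.Set.equal_iff, List.all_eq_true]
  constructor
  · rintro ⟨_, ha⟩ k hk
    have hkM : k ∈ PySem.Set.update (PySem.Set.ofList (D1.map Prod.fst)) (D2.map Prod.fst) :=
      (mem_keysM D1 D2 k).mpr (Or.inr hk)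
    have h := ha k hkM
    have hs : (dget D2 k).isSome = true := (dget_isSome_iff D2 k).mpr hk
    rcases ho : dget D2 k with _ | v
    · rw [ho] at hs; exact absurd hs (by decide)
    · rw [ho] at h
      simp only [Option.orElse, beq_iff_eq] at h
      exact h.symm
  · intro h
    refine ⟨?_, ?_⟩
    · intro x
      rw [mem_keysM, PySem.Set.mem_ofList]
      constructor
      · rintro (hx | hx)
        · exact hx
        · have := h x hx
          have hs : (dget D2 x).isSome = true := (dget_isSome_iff D2 x).mpr hx
          rw [← this] at hs
          exact (dget_isSome_iff D1 x).mp hs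
      · exact Or.inl
    · intro k hkM
      rcases ho : dget D2 k with _ | v
      · simp [Option.orElse]
      · have hk2 : k ∈ D2.map Prod.fst :=
          (dget_isSome_iff D2 k).mp (by rw [ho]; rfl)
        rw [h k hk2, ho]
        simp [Option.orElse]

-- ===== VERDICT (by name: the statement is the Claim_ definition above) =====
theorem checkDicts_spec : Claim_equal_checkDicts := by
  intro D1 D2 _
  unfold Spec_checkDicts
  have h := (checkDicts_iff D1 D2).trans (checkDicts_alt_iff D1 D2).symm
  exact Bool.coe_iff_coe.mp h
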